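-- pv_equiv track=rewrite | github.com/Ehsan-Tavan/Explainable_Detection_of_Online_Sexism | src/utils/graph_utils.py | build_windows
-- ===== SOURCE A (Python) =====
-- from typing import List
--
-- def build_windows(docs: List[str], window_size=20) -> List[list]:
--     """
--
--     Args:
--         docs:
--         window_size:
--
--     Returns:
--
--     """
--     windows = []
--     for doc in docs:
--         words = doc.split()
--         doc_length = len(words)
--         if doc_length <= window_size:
--             windows.append(words)
--         else:
--             for idx in range(doc_length - window_size + 1):
--                 window = words[idx: idx + window_size]
--                 windows.append(window)
--     return windows
-- ===== SOURCE B (Python) =====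
-- def build_windows(docs, window_size=20):
--     """Streaming re-implementation: one pass over the words of each doc,
--     maintaining a sliding buffer; a window is emitted whenever the buffer
--     fills, so no slicing or index ranges are needed."""
--     windows = []
--     for doc in docs:
--         buf = []
--         emitted = False
--         for w in doc.split():
--             buf.append(w)
--             if len(buf) == window_size:
--                 windows.append(buf.copy())
--                 emitted = True
--                 del buf[0]
--         if not emitted:
--             windows.append(buf)
--     return windows
-- ===== Notes on version B (the rewrite author's own statement) =====
-- stated objective: alternative
-- what changed: Replaces per-document index-range slicing with a single streaming pass over the words that maintains a sliding buffer and emits it each time it fills; no slices and no ranges.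
-- outside the precondition, e.g. on build_windows(['a b'], 0): A returns [[], [], []], B returns [['a', 'b']]; on build_windows([''], -1): A returns [[], []], B returns [[]]
import Mathlib
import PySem

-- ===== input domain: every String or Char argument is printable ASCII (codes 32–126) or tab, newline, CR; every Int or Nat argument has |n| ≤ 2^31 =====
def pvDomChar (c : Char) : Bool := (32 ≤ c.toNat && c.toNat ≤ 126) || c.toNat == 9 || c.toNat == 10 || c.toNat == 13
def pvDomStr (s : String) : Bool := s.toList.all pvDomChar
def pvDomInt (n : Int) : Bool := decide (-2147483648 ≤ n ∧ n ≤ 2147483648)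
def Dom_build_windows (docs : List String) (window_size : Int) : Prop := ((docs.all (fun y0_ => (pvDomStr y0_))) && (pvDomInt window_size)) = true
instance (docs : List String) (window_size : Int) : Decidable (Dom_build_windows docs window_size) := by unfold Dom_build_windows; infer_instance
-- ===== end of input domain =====

-- B replaces the slice-by-index construction with a streaming sliding-buffer pass (objective: alternative, same cost).

-- ===== PORT A =====
def build_windows (docs : List String) (window_size : Int) : List (List String) :=
  docs.foldl (fun windows doc =>
    let words := PySem.Str.split₀ doc
    let doc_length : Int := words.length
    if doc_length ≤ window_size then
      windows ++ [words]
    else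
      (PySem.List.pyRange 0 (doc_length - window_size + 1) 1).foldl
        (fun windows idx =>
          let window := PySem.List.slice words (some idx) (some (idx + window_size))
          windows ++ [window]) windows) []

-- ===== PORT B =====
-- step of B's inner loop over the words of one doc: state = (windows, buf, emitted)
def pvStepB (window_size : Int) (st : List (List String) × List String × Bool) (w : String) :
    List (List String) × List String × Bool :=
  let buf := st.2.1 ++ [w]
  if ((buf.length : Int) == window_size) then (st.1 ++ [buf], buf.drop 1, true)
  else (st.1, buf, st.2.2)

def build_windows_alt (docs : List String) (window_size : Int) : List (List String) :=
  docs.foldl (fun windows doc =>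
    let st := (PySem.Str.split₀ doc).foldl (pvStepB window_size) (windows, [], false)
    if st.2.2 then st.1 else st.1 ++ [st.2.1]) []

-- ===== PRECONDITION & SPEC =====
-- Pre_ restricts to the natural domain window_size ≥ 1: for window_size ≤ 0 A returns runs of
-- empty windows (an unspecified degenerate corner) while B returns one whole-word-list window.
def Pre_build_windows (docs : List String) (window_size : Int) : Prop := 1 ≤ window_size
instance (docs : List String) (window_size : Int) : Decidable (Pre_build_windows docs window_size) := by unfold Pre_build_windows; infer_instance
def pvWitness_build_windows : List String × Int := (["a b c"], 2)

def Spec_build_windows (docs : List String) (window_size : Int) (out : List (List String)) : Prop := out = build_windows_alt docs window_size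
instance (docs : List String) (window_size : Int) (out : List (List String)) : Decidable (Spec_build_windows docs window_size out) := by unfold Spec_build_windows; infer_instance

-- ===== CLAIM (what is proved, stated in full; the proofs are below) =====
def Claim_equal_build_windows : Prop := ∀ (docs : List String) (window_size : Int), Dom_build_windows docs window_size → Pre_build_windows docs window_size → Spec_build_windows docs window_size (build_windows docs window_size)

-- ===== LEMMAS AND PROOFS =====

-- Invariant of B's inner loop: starting with a buffer shorter than W, it appends all
-- sliding windows of buf ++ words, leaves the correct tail buffer, and records emission.
theorem pvStepB_inv (W : Nat) (hW : 1 ≤ W) (words : List String) :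
    ∀ (buf : List String) (wins : List (List String)) (e : Bool), buf.length < W →
      words.foldl (pvStepB (W : Int)) (wins, buf, e) =
        (wins ++ (List.range (buf.length + words.length + 1 - W)).map
            (fun i => ((buf ++ words).drop i).take W),
         if buf.length + words.length < W then buf ++ words
           else (buf ++ words).drop (buf.length + words.length + 1 - W),
         e || decide (W ≤ buf.length + words.length)) := by
  induction words with
  | nil =>
      intro buf wins e hb
      have h1 : buf.length + 0 + 1 - W = 0 := by omega
      simp [h1, hb]
  | cons w ws ih =>
      intro buf wins e hb
      have ht : buf ++ w :: ws = (buf ++ [w]) ++ ws := by simp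
      have hlen : (buf ++ [w]).length = buf.length + 1 := by simp
      have hlc : (w :: ws).length = ws.length + 1 := rfl
      by_cases hL : buf.length + 1 = W
      · rw [List.foldl_cons]
        rw [show pvStepB (W : Int) (wins, buf, e) w
              = (wins ++ [buf ++ [w]], (buf ++ [w]).drop 1, true) by
            unfold pvStepB; simp; omega]
        rw [ih ((buf ++ [w]).drop 1) (wins ++ [buf ++ [w]]) true
            (by rw [List.length_drop, hlen]; omega)]
        have hkey : ((buf ++ [w]).drop 1) ++ ws = (buf ++ w :: ws).drop 1 := by
          cases buf <;> simp
        have hdl : ((buf ++ [w]).drop 1).length = W - 1 := by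
          rw [List.length_drop, hlen]; omega
        rw [hkey, hdl]
        have hml : (W - 1) + ws.length + 1 - W = ws.length := by omega
        have hmr : buf.length + (w :: ws).length + 1 - W = ws.length + 1 := by
          rw [hlc]; omega
        rw [hml, hmr]
        have htk : (buf ++ w :: ws).take W = buf ++ [w] := by
          rw [ht, List.take_left' (by rw [hlen]; omega)]
        simp only [Prod.mk.injEq]
        refine ⟨?_, ?_, ?_⟩
        · rw [List.range_succ_eq_map, List.map_cons, List.map_map, List.append_assoc]
          congr 1
          rw [List.drop_zero, htk, List.singleton_append]
          congr 1
          apply List.map_congr_left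
          intro i _
          simp only [Function.comp_apply]
          rw [List.drop_drop]
          congr 2
          omega
        · have hR : ¬ (buf.length + (w :: ws).length < W) := by rw [hlc]; omega
          rw [if_neg hR]
          by_cases hn : ws.length = 0
          · rw [if_pos (by omega), hn]
          · rw [if_neg (by omega), List.drop_drop]
            congr 1
            omega
        · have hdec : decide (W ≤ buf.length + (w :: ws).length) = true := by
            rw [hlc]; simp; omega
          rw [hdec, Bool.true_or, Bool.or_true]
      · rw [List.foldl_cons]
        rw [show pvStepB (W : Int) (wins, buf, e) w = (wins, buf ++ [w], e) by
            unfold pvStepB; simp; omega]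
        rw [ih (buf ++ [w]) wins e (by rw [hlen]; omega)]
        rw [← ht, hlen]
        have h2 : buf.length + 1 + ws.length = buf.length + (w :: ws).length := by
          rw [hlc]; omega
        rw [h2]

-- Per-document agreement of the two loop bodies, for 1 ≤ W.
theorem perDoc_eq (W : Nat) (hW : 1 ≤ W) (acc : List (List String)) (words : List String) :
    (if (words.length : Int) ≤ (W : Int) then acc ++ [words]
     else (PySem.List.pyRange 0 ((words.length : Int) - (W : Int) + 1) 1).foldl
        (fun windows idx =>
          windows ++ [PySem.List.slice words (some idx) (some (idx + (W : Int)))]) acc)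
    = (let st := words.foldl (pvStepB (W : Int)) (acc, [], false)
       if st.2.2 then st.1 else st.1 ++ [st.2.1]) := by
  rw [pvStepB_inv W hW words [] acc false (by simpa using hW)]
  simp only [List.nil_append, List.length_nil, Nat.zero_add]
  rcases lt_trichotomy words.length W with hn | hn | hn
  · have h0 : words.length + 1 - W = 0 := by omega
    have hd : decide (W ≤ words.length) = false := by simp; omega
    rw [if_pos (by exact_mod_cast Int.ofNat_le.mpr (by omega))]
    simp [h0, hd, hn]
  · have h1 : words.length + 1 - W = 1 := by omega
    have hd : decide (W ≤ words.length) = true := by simp; omega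
    rw [if_pos (by exact_mod_cast Int.ofNat_le.mpr (by omega))]
    simp [h1, hd, List.take_of_length_le (by omega : words.length ≤ W)]
  · have hd : decide (W ≤ words.length) = true := by simp; omega
    rw [if_neg (by omega)]
    rw [PySem.List.foldl_append_singleton_eq_map]
    simp only [hd]
    congr 1
    rw [PySem.List.pyRange_one]
    rw [List.map_map]
    have hc : ((words.length : Int) - (W : Int) + 1 - 0).toNat = words.length + 1 - W := by
      omega
    rw [hc]
    apply List.map_congr_left
    intro k hk
    simp only [Function.comp_apply]
    rw [PySem.List.slice_toNat _ (by positivity) (by positivity)]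
    have e1 : ((0:Int) + (k:Int)).toNat = k := by omega
    rw [e1]
    have e2 : ((0:Int) + (k:Int) + (W:Int)).toNat - k = W := by omega
    rw [e2]

theorem build_windows_eq_alt (docs : List String) (ws : Int) (hws : 1 ≤ ws) :
    build_windows docs ws = build_windows_alt docs ws := by
  lift ws to ℕ using (by omega : (0:ℤ) ≤ ws) with W
  have hW : 1 ≤ W := by exact_mod_cast hws
  unfold build_windows build_windows_alt
  rw [show (fun (windows : List (List String)) (doc : String) =>
        let words := PySem.Str.split₀ doc
        let doc_length : Int := words.length
        if doc_length ≤ (W : Int) then windows ++ [words]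
        else (PySem.List.pyRange 0 (doc_length - (W : Int) + 1) 1).foldl
          (fun windows idx =>
            let window := PySem.List.slice words (some idx) (some (idx + (W : Int)))
            windows ++ [window]) windows)
      = (fun (windows : List (List String)) (doc : String) =>
          let st := (PySem.Str.split₀ doc).foldl (pvStepB (W : Int)) (windows, [], false)
          if st.2.2 then st.1 else st.1 ++ [st.2.1])
      from funext fun acc => funext fun doc => perDoc_eq W hW acc (PySem.Str.split₀ doc)]

-- ===== VERDICT (by name: the statement is the Claim_ definition above) =====
theorem build_windows_spec : Claim_equal_build_windows := by
  intro docs ws _ hpre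
  unfold Spec_build_windows
  exact build_windows_eq_alt docs ws hpre
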